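-- pv_equiv track=rewrite | github.com/daniel-reich/turbo-robot | vnzjuqjCf4MFHGLJp_14.py | shift_letters
-- ===== SOURCE A (Python) =====
-- def shift_letters(txt, n):
--   nospace = txt.replace(" ", "")
--   x = len(nospace)
--   count = 0
--   ans = ""
--   for i in txt:
--     if i == " ":
--       ans += " "
--     else:
--       ans += nospace[(count-n)%x]
--       count += 1
--   return ans
-- ===== SOURCE B (Python) =====
-- def shift_letters(txt, n):
--     chunks = txt.split(" ")
--     nospace = "".join(chunks)
--     x = len(nospace)
--     k = (-n) % x if x else 0
--     rotated = nospace[k:] + nospace[:k]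
--     pieces = []
--     pos = 0
--     for w in chunks:
--         pieces.append(rotated[pos:pos + len(w)])
--         pos += len(w)
--     return " ".join(pieces)
-- ===== Notes on version B (the rewrite author's own statement) =====
-- stated objective: faster
-- what changed: B works on whole words instead of characters: it splits txt on spaces, rotates the concatenated letters once by (-n)%x, then reassembles the result by cutting consecutive slices of the rotated string with the words' lengths and joining them with spaces, replacing A's per-character loop that recomputes a modular index and concatenates one character at a time.
import Mathlib
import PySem

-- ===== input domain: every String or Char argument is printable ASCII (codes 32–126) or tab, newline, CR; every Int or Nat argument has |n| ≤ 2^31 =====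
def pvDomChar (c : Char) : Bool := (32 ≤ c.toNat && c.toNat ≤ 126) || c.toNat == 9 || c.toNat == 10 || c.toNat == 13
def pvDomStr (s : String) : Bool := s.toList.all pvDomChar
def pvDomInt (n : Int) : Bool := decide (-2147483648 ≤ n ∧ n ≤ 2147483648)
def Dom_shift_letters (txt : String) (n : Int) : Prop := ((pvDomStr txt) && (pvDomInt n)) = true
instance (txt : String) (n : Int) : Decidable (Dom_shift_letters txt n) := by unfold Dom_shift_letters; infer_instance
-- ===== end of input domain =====

-- B replaces A's per-character loop (modular index per letter, char-by-char concatenation) by a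
-- word-level algorithm: split on spaces, rotate the letters once, cut the rotation into
-- word-sized slices and join with spaces; return values are proved equal on all inputs.

-- ===== PORT A =====
-- A's loop: for each char of txt, keep spaces, else take nospace[(count-n)%x] and bump count.
-- nospace[(count-n)%x] is ported with pyGetD: on the branch where it runs, nospace is nonempty,
-- so 0 ≤ (count-n) % x < x and the index is always in range (the default is never used; A is total).
def shift_letters (txt : String) (n : Int) : String :=
  let nospace : List Char := (PySem.Str.replace txt " " "").toList
  let x : Int := (nospace.length : Int)
  let r := txt.toList.foldl
    (fun (s : Int × List Char) c =>
      if c = ' ' then (s.1, s.2 ++ [' '])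
      else (s.1 + 1, s.2 ++ [PySem.List.pyGetD nospace (PySem.Int.mod (s.1 - n) x) ' ']))
    (0, [])
  String.ofList r.2

-- ===== PORT B =====
-- B: chunks = txt.split(" "); nospace = "".join(chunks); rotated = nospace[k:] + nospace[:k]
-- with k = (-n) % x (0 if x = 0); then one loop over the WORDS, cutting rotated[pos:pos+len(w)]
-- for each word w, and " ".join of the pieces.
def shift_letters_alt (txt : String) (n : Int) : String :=
  let chunks : List (List Char) := PySem.Chars.splitOn txt.toList [' ']
  let nospace : List Char := PySem.Chars.join [] chunks
  let x : Int := (nospace.length : Int)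
  let k : Int := if x ≠ 0 then PySem.Int.mod (-n) x else 0
  let rotated : List Char :=
    PySem.List.slice nospace (some k) none ++ PySem.List.slice nospace none (some k)
  let r := chunks.foldl
    (fun (s : Int × List (List Char)) w =>
      (s.1 + (w.length : Int),
       s.2 ++ [PySem.List.slice rotated (some s.1) (some (s.1 + (w.length : Int)))]))
    (0, [])
  String.ofList (PySem.Chars.join [' '] r.2)

-- ===== PRECONDITION & SPEC =====
def Spec_shift_letters (txt : String) (n : Int) (out : String) : Prop := out = shift_letters_alt txt n
instance (txt : String) (n : Int) (out : String) : Decidable (Spec_shift_letters txt n out) := by unfold Spec_shift_letters; infer_instance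

-- ===== CLAIM (what is proved, stated in full; the proofs are below) =====
def Claim_equal_shift_letters : Prop := ∀ (txt : String) (n : Int), Dom_shift_letters txt n → Spec_shift_letters txt n (shift_letters txt n)

-- ===== LEMMAS AND PROOFS =====

-- txt.replace(" ", "") is the filter keeping the non-space characters.
theorem replace_space_go (cs : List Char) (fuel : Nat) (acc : List Char)
    (h : cs.length ≤ fuel) :
    PySem.Chars.replace.go [' '] [] fuel cs acc
      = acc.reverse ++ cs.filter (fun c => !(c == ' ')) := by
  induction cs generalizing fuel acc with
  | nil => cases fuel <;> simp [PySem.Chars.replace.go]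
  | cons c t ih =>
    cases fuel with
    | zero => simp at h
    | succ fuel =>
      simp only [PySem.Chars.replace.go]
      by_cases hc : c = ' '
      · subst hc
        simp only [List.isPrefixOf, beq_self_eq_true, Bool.true_and, if_pos]
        rw [show List.drop [' '].length (' ' :: t) = t from rfl,
          ih fuel _ (by simpa using Nat.le_of_succ_le_succ h)]
        simp
      · rw [if_neg (by simp [List.isPrefixOf]; exact fun h' => hc (by simpa using h'.symm)),
          ih fuel _ (by simpa using Nat.le_of_succ_le_succ h)]
        simp [hc]

theorem replace_space (cs : List Char) :
    PySem.Chars.replace cs [' '] [] = cs.filter (fun c => !(c == ' ')) := by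
  simp only [PySem.Chars.replace, List.isEmpty_cons, Bool.false_eq_true, if_neg,
    Bool.false_eq_true, not_false_iff]
  exact replace_space_go cs cs.length [] le_rfl

-- the sequential-consumption description of the task: spaces stay, letters are drawn in order
def pvMerge : List Char → List Char → List Char
  | [], _ => []
  | c :: t, it => if c = ' ' then ' ' :: pvMerge t it else it.headD ' ' :: pvMerge t it.tail

-- the character A picks equals the character the sequential description yields
theorem idx_eq (ns : List Char) (n : Int) (s count : Nat)
    (hcount : count < ns.length)
    (hs : (s : Int) = PySem.Int.mod (-n) (ns.length : Int)) :
    PySem.List.pyGetD ns (PySem.Int.mod ((count : Int) - n) (ns.length : Int)) ' '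
      = ((ns.drop s ++ ns.take s).drop count).headD ' ' := by
  have hxn : 0 < ns.length := Nat.lt_of_le_of_lt (Nat.zero_le _) hcount
  have hx : (0 : Int) < (ns.length : Int) := by exact_mod_cast hxn
  rw [PySem.Int.mod_eq_emod_of_pos hx] at hs
  rw [PySem.Int.mod_eq_emod_of_pos hx]
  have hs' : s < ns.length := by
    have := Int.emod_lt_of_pos (-n) hx
    omega
  have hmodlt : ((count : Int) - n) % (ns.length : Int) < (ns.length : Int) :=
    Int.emod_lt_of_pos _ hx
  have hmodnn : 0 ≤ ((count : Int) - n) % (ns.length : Int) := Int.emod_nonneg _ (by omega)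
  rw [PySem.List.pyGetD_eq_getElem ns ' ' hmodnn hmodlt,
    ← List.rotate_eq_drop_append_take (Nat.le_of_lt hs')]
  have hlenrot : (ns.rotate s).length = ns.length := List.length_rotate ns s
  have hcnt' : count < (ns.rotate s).length := by omega
  rw [List.headD_eq_head?_getD, List.head?_drop, List.getElem?_eq_getElem hcnt']
  show ns[(((count : Int) - n) % (ns.length : Int)).toNat] = (ns.rotate s)[count]
  rw [List.getElem_rotate]
  have hdiv : -n - (s : Int) = (ns.length : Int) * ((-n) / (ns.length : Int)) := by
    have := Int.emod_add_mul_ediv (-n) (ns.length : Int)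
    omega
  have h3 : ((count : Int) - n) % (ns.length : Int)
      = ((count : Int) + s) % (ns.length : Int) := by
    have heq : (count : Int) - n = ((count : Int) + s) + (ns.length : Int) * ((-n) / (ns.length : Int)) := by
      omega
    rw [heq, Int.add_mul_emod_self_left]
  have hidx : (((count : Int) - n) % (ns.length : Int)).toNat = (count + s) % ns.length := by
    rw [h3, show ((count : Int) + (s : Int)) = ((count + s : Nat) : Int) by push_cast; ring,
      ← Int.natCast_emod _ _]
    omega
  exact getElem_congr rfl hidx (by omega)

-- A's loop computes pvMerge txt rotated
theorem a_loop_eq (ns : List Char) (n : Int) (s : Nat)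
    (hs : 0 < ns.length → (s : Int) = PySem.Int.mod (-n) (ns.length : Int)) :
    ∀ (rest : List Char) (count : Nat) (acc : List Char),
      count + (rest.filter (fun c => !(c == ' '))).length = ns.length →
      (rest.foldl
        (fun (st : Int × List Char) c =>
          if c = ' ' then (st.1, st.2 ++ [' '])
          else (st.1 + 1, st.2 ++ [PySem.List.pyGetD ns (PySem.Int.mod (st.1 - n) (ns.length : Int)) ' ']))
        ((count : Int), acc)).2
      = acc ++ pvMerge rest ((ns.drop s ++ ns.take s).drop count) := by
  intro rest
  induction rest with
  | nil => intro count acc _; simp [pvMerge]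
  | cons c t ih =>
    intro count acc h
    by_cases hc : c = ' '
    · subst hc
      simp only [List.foldl_cons, if_pos, pvMerge]
      rw [ih count (acc ++ [' ']) (by simpa using h)]
      simp
    · have hlt : count < ns.length := by
        simp only [List.filter_cons] at h
        simp [hc] at h
        omega
      simp only [List.foldl_cons, if_neg hc, pvMerge]
      have hcast : ((count : Int) + 1) = ((count + 1 : Nat) : Int) := by push_cast; ring
      rw [hcast, ih (count + 1) _ (by simp only [List.filter_cons] at h; simp [hc] at h; omega)]
      rw [idx_eq ns n s count hlt (hs (by omega))]
      rw [List.tail_drop, show count + 1 = count + 1 from rfl]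
      simp

-- simple structural split on ' ' (proof-side model of txt.split(" "))
def pvSplit : List Char → List (List Char)
  | [] => [[]]
  | c :: t =>
      if c = ' ' then [] :: pvSplit t
      else match pvSplit t with
        | [] => [[c]]
        | w :: ws => (c :: w) :: ws

theorem pvSplit_ne_nil (cs : List Char) : pvSplit cs ≠ [] := by
  cases cs with
  | nil => simp [pvSplit]
  | cons c t =>
    simp only [pvSplit]
    split_ifs
    · simp
    · cases h : pvSplit t <;> simp

-- PySem's splitOn on a single space is pvSplit
theorem splitOn_go_eq (cs : List Char) (fuel : Nat) (cur : List Char) (acc : List (List Char))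
    (h : cs.length ≤ fuel) :
    PySem.Chars.splitOn.go [' '] fuel cs cur acc
      = acc.reverse ++ (pvSplit cs).modifyHead (cur.reverse ++ ·) := by
  induction cs generalizing fuel cur acc with
  | nil => cases fuel <;> simp [PySem.Chars.splitOn.go, pvSplit]
  | cons c t ih =>
    cases fuel with
    | zero => simp at h
    | succ fuel =>
      simp only [PySem.Chars.splitOn.go]
      by_cases hc : c = ' '
      · subst hc
        simp only [List.isPrefixOf, beq_self_eq_true, Bool.true_and, if_pos]
        rw [show List.drop [' '].length (' ' :: t) = t from rfl,
          ih fuel [] _ (by simpa using Nat.le_of_succ_le_succ h)]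
        simp [pvSplit]
        cases hsp : pvSplit t with
        | nil => exact absurd hsp (pvSplit_ne_nil t)
        | cons w ws => simp [List.modifyHead]
      · rw [if_neg (by simp [List.isPrefixOf]; exact fun h' => hc (by simpa using h'.symm)),
          ih fuel (c :: cur) acc (by simpa using Nat.le_of_succ_le_succ h)]
        simp only [pvSplit, if_neg hc]
        cases hsp : pvSplit t with
        | nil => exact absurd hsp (pvSplit_ne_nil t)
        | cons w ws => simp [List.modifyHead]

theorem splitOn_space (cs : List Char) :
    PySem.Chars.splitOn cs [' '] = pvSplit cs := by
  have h := splitOn_go_eq cs (cs.length + 1) [] [] (by omega)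
  rw [PySem.Chars.splitOn, h]
  cases pvSplit cs <;> simp [List.modifyHead]

-- " ".join undoes the split
theorem intercalate_pvSplit (cs : List Char) :
    [' '].intercalate (pvSplit cs) = cs := by
  induction cs with
  | nil => simp [pvSplit, List.intercalate]
  | cons c t ih =>
    simp only [pvSplit]
    by_cases hc : c = ' '
    · subst hc
      rw [if_pos rfl]
      cases hsp : pvSplit t with
      | nil => exact absurd hsp (pvSplit_ne_nil t)
      | cons w ws =>
        rw [hsp] at ih
        simp only [List.intercalate, List.intersperse] at ih ⊢
        simpa using ih
    · rw [if_neg hc]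
      cases hsp : pvSplit t with
      | nil => exact absurd hsp (pvSplit_ne_nil t)
      | cons w ws =>
        rw [hsp] at ih
        cases ws with
        | nil => simpa [List.intercalate, List.intersperse] using ih
        | cons w2 ws2 =>
          simp only [List.intercalate, List.intersperse] at ih ⊢
          simpa using ih

-- "".join of the split is the filter keeping non-space characters
theorem flatten_pvSplit (cs : List Char) :
    (pvSplit cs).flatten = cs.filter (fun c => !(c == ' ')) := by
  induction cs with
  | nil => simp [pvSplit]
  | cons c t ih =>
    simp only [pvSplit]
    by_cases hc : c = ' '
    · subst hc; simp [ih]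
    · rw [if_neg hc]
      cases hsp : pvSplit t with
      | nil => exact absurd hsp (pvSplit_ne_nil t)
      | cons w ws =>
        rw [hsp] at ih
        simp only [List.flatten_cons] at ih ⊢
        simp [hc, ← ih]

-- no chunk contains a space
theorem pvSplit_no_space (cs : List Char) : ∀ w ∈ pvSplit cs, ' ' ∉ w := by
  induction cs with
  | nil => simp [pvSplit]
  | cons c t ih =>
    simp only [pvSplit]
    by_cases hc : c = ' '
    · subst hc
      intro w hw
      rcases List.mem_cons.mp hw with h | h
      · subst h; simp
      · exact ih w h
    · rw [if_neg hc]
      cases hsp : pvSplit t with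
      | nil => exact absurd hsp (pvSplit_ne_nil t)
      | cons v ws =>
        rw [hsp] at ih
        intro w hw
        rcases List.mem_cons.mp hw with h | h
        · subst h
          intro hm
          rcases List.mem_cons.mp hm with h' | h'
          · exact hc h'.symm
          · exact ih v (List.mem_cons_self ..) h'
        · exact ih w (List.mem_cons_of_mem _ h)

-- pvMerge over a spaceless prefix takes it from the iterator
theorem pvMerge_append (w : List Char) (r it : List Char)
    (hw : ' ' ∉ w) (hlen : w.length ≤ it.length) :
    pvMerge (w ++ r) it = it.take w.length ++ pvMerge r (it.drop w.length) := by
  induction w generalizing it with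
  | nil => simp
  | cons c t ih =>
    have hc : c ≠ ' ' := fun h => hw (h ▸ List.mem_cons_self ..)
    cases it with
    | nil => simp at hlen
    | cons a as =>
      simp only [List.cons_append, pvMerge, if_neg hc, List.headD, List.tail_cons,
        List.length_cons, List.take_succ_cons, List.drop_succ_cons, List.cons_append]
      rw [ih as (fun h => hw (List.mem_cons_of_mem _ h)) (by simpa using hlen)]

-- successive word-sized cuts of the iterator
def pvChunks : List (List Char) → List Char → List (List Char)
  | [], _ => []
  | w :: ws, it => it.take w.length :: pvChunks ws (it.drop w.length)

-- the word-level reassembly equals the sequential description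
theorem merge_chunks (ws : List (List Char)) (it : List Char)
    (hns : ∀ w ∈ ws, ' ' ∉ w)
    (hlen : (ws.map List.length).sum ≤ it.length) :
    pvMerge ([' '].intercalate ws) it = [' '].intercalate (pvChunks ws it) := by
  induction ws generalizing it with
  | nil => simp [List.intercalate, pvMerge, pvChunks]
  | cons w ws ih =>
    have hw : ' ' ∉ w := hns w (List.mem_cons_self ..)
    have hwlen : w.length ≤ it.length := by
      simp only [List.map_cons, List.sum_cons] at hlen; omega
    cases ws with
    | nil =>
      simp only [pvChunks, List.intercalate, List.intersperse, List.flatten]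
      have := pvMerge_append w [] it hw hwlen
      simpa [pvMerge] using this
    | cons w2 ws2 =>
      have h1 : [' '].intercalate (w :: w2 :: ws2) = w ++ ' ' :: [' '].intercalate (w2 :: ws2) := by
        simp [List.intercalate, List.intersperse]
      have h2 : [' '].intercalate (pvChunks (w :: w2 :: ws2) it)
          = it.take w.length ++ ' ' :: [' '].intercalate (pvChunks (w2 :: ws2) (it.drop w.length)) := by
        simp [pvChunks, List.intercalate]
      rw [h1, h2, pvMerge_append w _ it hw hwlen]
      congr 1
      have : pvMerge (' ' :: [' '].intercalate (w2 :: ws2)) (it.drop w.length)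
          = ' ' :: pvMerge ([' '].intercalate (w2 :: ws2)) (it.drop w.length) := by
        simp [pvMerge]
      rw [this, ih (it.drop w.length) (fun v hv => hns v (List.mem_cons_of_mem _ hv))
        (by simp only [List.map_cons, List.sum_cons, List.length_drop] at hlen ⊢; omega)]

-- B's loop over the words builds pvChunks
theorem b_loop_eq (rot : List Char) :
    ∀ (ws : List (List Char)) (pos : Nat) (pieces : List (List Char)),
      (ws.foldl
        (fun (s : Int × List (List Char)) w =>
          (s.1 + (w.length : Int),
           s.2 ++ [PySem.List.slice rot (some s.1) (some (s.1 + (w.length : Int)))]))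
        ((pos : Int), pieces)).2
      = pieces ++ pvChunks ws (rot.drop pos) := by
  intro ws
  induction ws with
  | nil => intro pos pieces; simp [pvChunks]
  | cons w t ih =>
    intro pos pieces
    simp only [List.foldl_cons]
    rw [PySem.List.slice_natCast_add rot pos w.length,
      show ((pos : Int) + (w.length : Int)) = ((pos + w.length : Nat) : Int) by push_cast; ring,
      ih (pos + w.length) _]
    simp [pvChunks, List.drop_drop]

-- ===== VERDICT (by name: the statement is the Claim_ definition above) =====
theorem shift_letters_spec : Claim_equal_shift_letters := by
  intro txt n _
  unfold Spec_shift_letters shift_letters shift_letters_alt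
  simp only []
  set cs : List Char := txt.toList with hcs
  -- both "nospace" strings are the non-space filter of txt
  have hnsA : (PySem.Str.replace txt " " "").toList = cs.filter (fun c => !(c == ' ')) := by
    rw [PySem.Str.toList_replace]
    exact replace_space cs
  have hchunks : PySem.Chars.splitOn cs [' '] = pvSplit cs := splitOn_space cs
  have hnsB : PySem.Chars.join [] (PySem.Chars.splitOn cs [' ']) = cs.filter (fun c => !(c == ' ')) := by
    rw [hchunks]
    show List.intercalate [] (pvSplit cs) = _
    have hflat : List.intercalate [] (pvSplit cs) = (pvSplit cs).flatten := by
      induction pvSplit cs with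
      | nil => simp [List.intercalate]
      | cons x t ih => cases t <;> simp_all [List.intercalate, List.intersperse]
    rw [hflat, flatten_pvSplit]
  set ns : List Char := cs.filter (fun c => !(c == ' ')) with hns
  rw [hnsA, hnsB, hchunks]
  set k : Int := if (ns.length : Int) ≠ 0 then PySem.Int.mod (-n) (ns.length : Int) else 0
    with hk
  have hknn : 0 ≤ k := by
    rw [hk]
    split_ifs with hx0
    · exact PySem.Int.mod_nonneg _ (by omega)
    · exact le_rfl
  rw [PySem.List.slice_from ns hknn, PySem.List.slice_to ns hknn]
  set rot : List Char := ns.drop k.toNat ++ ns.take k.toNat with hrot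
  have hrotlen : rot.length = ns.length := by
    rw [hrot]; simp [List.length_drop, List.length_take]; omega
  -- A side: the loop is pvMerge cs rot
  have hA := a_loop_eq ns n k.toNat
    (by
      intro hpos
      have hx : (ns.length : Int) ≠ 0 := by exact_mod_cast Nat.pos_iff_ne_zero.mp hpos
      rw [hk, if_pos hx]
      have h0 : 0 ≤ PySem.Int.mod (-n) (ns.length : Int) := PySem.Int.mod_nonneg _ (by omega)
      omega)
    cs 0 [] (by simp [hns])
  simp only [Int.ofNat_zero, List.drop_zero, List.nil_append] at hA
  rw [← hrot] at hA
  rw [hA]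
  -- B side: the loop builds pvChunks, and the reassembly is pvMerge
  have hB := b_loop_eq rot (pvSplit cs) 0 []
  simp only [Nat.cast_zero, List.drop_zero, List.nil_append] at hB
  rw [hB]
  show String.ofList (pvMerge cs rot) = String.ofList ([' '].intercalate (pvChunks (pvSplit cs) rot))
  rw [← merge_chunks (pvSplit cs) rot (pvSplit_no_space cs)
      (by
        rw [← List.length_flatten, flatten_pvSplit, hrotlen, hns]),
    intercalate_pvSplit]
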